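-- pv_equiv track=rewrite | github.com/CSE5914PaperLink/CSE5914 | backend/app/services/comparison_service.py | _nearest_section_by_page
-- ===== SOURCE A (Python) =====
-- from typing import Any, Dict, List, Optional, Tuple
--
-- def _nearest_section_by_page(
--     page: int,
--     section_pages: Dict[str, List[int]],
--     section_names: List[str],
-- ) -> Optional[str]:
--     best_name = None
--     best_distance = float("inf")
--     for name in section_names:
--         pages = section_pages.get(name, [])
--         if not pages:
--             continue
--         distances = [abs(page - p) for p in pages]
--         if not distances:
--             continue
--         distance = min(distances)
--         if distance < best_distance:
--             best_distance = distance
--             best_name = name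
--     return best_name
-- ===== SOURCE B (Python) =====
-- from typing import Dict, List, Optional
--
-- def _nearest_section_by_page(
--     page: int,
--     section_pages: Dict[str, List[int]],
--     section_names: List[str],
-- ) -> Optional[str]:
--     candidates = [
--         (abs(page - p), i)
--         for i, name in enumerate(section_names)
--         for p in section_pages.get(name, [])
--     ]
--     if not candidates:
--         return None
--     return section_names[min(candidates)[1]]
-- ===== Notes on version B (the rewrite author's own statement) =====
-- stated objective: alternative
-- what changed: A keeps a running (best_name, best_distance) pair and computes a per-section min inside the loop; B never computes per-section minima at all: it flattens every page of every listed section into one list of (abs(page-p), section_index) pairs with a single comprehension and takes one global lexicographic min, whose index component recovers A's first-wins section.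
import Mathlib
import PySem

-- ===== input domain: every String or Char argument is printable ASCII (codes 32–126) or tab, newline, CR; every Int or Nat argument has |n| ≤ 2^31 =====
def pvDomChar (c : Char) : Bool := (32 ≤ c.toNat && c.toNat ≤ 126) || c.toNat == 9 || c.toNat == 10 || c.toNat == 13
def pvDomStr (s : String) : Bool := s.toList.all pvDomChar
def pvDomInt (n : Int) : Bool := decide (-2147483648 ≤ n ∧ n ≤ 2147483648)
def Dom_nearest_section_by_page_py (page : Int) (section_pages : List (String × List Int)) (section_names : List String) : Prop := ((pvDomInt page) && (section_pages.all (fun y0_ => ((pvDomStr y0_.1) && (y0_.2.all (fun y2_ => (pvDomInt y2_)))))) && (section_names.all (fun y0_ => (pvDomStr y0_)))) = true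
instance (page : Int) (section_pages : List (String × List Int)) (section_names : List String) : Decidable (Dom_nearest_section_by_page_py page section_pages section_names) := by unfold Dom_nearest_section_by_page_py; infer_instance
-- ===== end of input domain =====

-- B drops A's per-section minimum and running best pair: it flattens everything into one list of
-- (distance, section-index) candidates and takes a single global lexicographic min (alternative decomposition, same cost).

-- ===== PORT A =====
-- running (best_name, best_distance) state; best_distance = none models float("inf")
def nearest_section_by_page_py (page : Int) (section_pages : List (String × List Int)) (section_names : List String) : Option String :=
  (section_names.foldl
    (fun (st : Option String × Option Int) name =>
      match (PySem.Dict.mk section_pages).getD name [] with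
      | [] => st
      | p :: ps =>
        match PySem.List.min? ((p :: ps).map (fun q => |page - q|)) (fun x => x) with
        | none => st
        | some distance =>
          match st.2 with
          | none => (some name, some distance)
          | some bd => if distance < bd then (some name, some distance) else st)
    (none, none)).1

-- ===== PORT B =====
-- Source B: flatten all (abs(page-p), i) pairs, one global lexicographic min, index back into section_names
def nearest_section_by_page_py_alt (page : Int) (section_pages : List (String × List Int)) (section_names : List String) : Option String :=
  let candidates := (PySem.List.enumerate section_names 0).flatMap
    (fun iname => ((PySem.Dict.mk section_pages).getD iname.2 []).map (fun p => (|page - p|, iname.1)))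
  if candidates.isEmpty then none
  else
    match PySem.List.min2? candidates (fun c => c.1) (fun c => c.2) with
    | none => none
    | some c => PySem.List.pyGet? section_names c.2

-- ===== PRECONDITION & SPEC =====
def Spec_nearest_section_by_page_py (page : Int) (section_pages : List (String × List Int)) (section_names : List String) (out : Option String) : Prop := out = nearest_section_by_page_py_alt page section_pages section_names
instance (page : Int) (section_pages : List (String × List Int)) (section_names : List String) (out : Option String) : Decidable (Spec_nearest_section_by_page_py page section_pages section_names out) := by unfold Spec_nearest_section_by_page_py; infer_instance

-- ===== CLAIM (what is proved, stated in full; the proofs are below) =====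
def Claim_equal_nearest_section_by_page_py : Prop := ∀ (page : Int) (section_pages : List (String × List Int)) (section_names : List String), Dom_nearest_section_by_page_py page section_pages section_names → Spec_nearest_section_by_page_py page section_pages section_names (nearest_section_by_page_py page section_pages section_names)

-- ===== LEMMAS AND PROOFS =====

-- the lexicographic first-minimum step that min2? performs
def pvLStep (acc : Option (Int × Int)) (x : Int × Int) : Option (Int × Int) :=
  match acc with
  | none => some x
  | some m => if (decide (x.1 < m.1) || !decide (m.1 < x.1) && decide (x.2 < m.2)) = true then some x else some m

lemma pvLStep_none (x : Int × Int) : pvLStep none x = some x := rfl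

lemma pvLStep_some (m x : Int × Int) :
    pvLStep (some m) x = if (decide (x.1 < m.1) || !decide (m.1 < x.1) && decide (x.2 < m.2)) = true then some x else some m := rfl

lemma pvMin2Eq (l : List (Int × Int)) :
    PySem.List.min2? l (fun c => c.1) (fun c => c.2) = l.foldl pvLStep none := by
  simp only [PySem.List.min2?]
  congr 1
  funext acc x
  cases acc <;> rfl

lemma pvFoldlMinMin (l : List Int) : ∀ a b : Int, l.foldl min (min a b) = min a (l.foldl min b) := by
  induction l with
  | nil => intro a b; rfl
  | cons c t ih =>
    intro a b
    simp only [List.foldl_cons]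
    rw [min_assoc, ih]

-- folding same-index candidates from seed (d0, i) is a running min on the distances
lemma pvLexA (i : Int) : ∀ (ds : List Int) (d0 : Int),
    (ds.map (fun d => (d, i))).foldl pvLStep (some (d0, i)) = some (ds.foldl min d0, i) := by
  intro ds
  induction ds with
  | nil => intro d0; rfl
  | cons d t ih =>
    intro d0
    simp only [List.map_cons, List.foldl_cons, pvLStep_some]
    have h : (if (decide (d < d0) || !decide (d0 < d) && decide (i < i)) = true
        then some (d, i) else some (d0, i)) = some (min d0 d, i) := by
      by_cases hd : d < d0
      · rw [if_pos (by simp [hd])]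
        have hm : min d0 d = d := by omega
        rw [hm]
      · have hc : (decide (d < d0) || !decide (d0 < d) && decide (i < i)) = false := by
          simp [hd]
        rw [hc]
        simp only [Bool.false_eq_true, if_false]
        have hm : min d0 d = d0 := by omega
        rw [hm]
    rw [h, ih]

-- folding index-i candidates into an earlier best (bd, bi), bi < i: strict improvement on distance
lemma pvLexB (i bi bd : Int) (hbi : bi < i) : ∀ (ds : List Int) (d0 : Int),
    ((d0 :: ds).map (fun d => (d, i))).foldl pvLStep (some (bd, bi))
    = if ds.foldl min d0 < bd then some (ds.foldl min d0, i) else some (bd, bi) := by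
  intro ds
  induction ds with
  | nil =>
    intro d0
    simp only [List.map_cons, List.map_nil, List.foldl_cons, List.foldl_nil, pvLStep_some]
    by_cases hd : d0 < bd
    · have hc : (decide (d0 < bd) || !decide (bd < d0) && decide (i < bi)) = true := by simp [hd]
      rw [if_pos hc, if_pos hd]
    · have hc : (decide (d0 < bd) || !decide (bd < d0) && decide (i < bi)) = false := by
        simp [hd]; omega
      rw [hc]
      simp only [Bool.false_eq_true, if_false, if_neg hd]
  | cons d t ih =>
    intro d0
    simp only [List.map_cons, List.foldl_cons, pvLStep_some]
    by_cases hd : d0 < bd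
    · have hc : (decide (d0 < bd) || !decide (bd < d0) && decide (i < bi)) = true := by simp [hd]
      rw [if_pos hc]
      have hA := pvLexA i (d :: t) d0
      simp only [List.map_cons, List.foldl_cons, pvLStep_some] at hA
      simp only [pvLStep_some]
      rw [hA]
      have hle := (PySem.List.foldl_min_le t (min d0 d)).1
      have h1 := min_le_left d0 d
      rw [if_pos (by omega)]
    · have hc : (decide (d0 < bd) || !decide (bd < d0) && decide (i < bi)) = false := by
        simp [hd]; omega
      rw [hc]
      simp only [Bool.false_eq_true, if_false]
      have hI := ih d
      simp only [List.map_cons, List.foldl_cons, pvLStep_some] at hI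
      simp only [pvLStep_some]
      rw [hI]
      have hmm := pvFoldlMinMin t d0 d
      rw [hmm]
      by_cases hv : t.foldl min d < bd
      · rw [if_pos hv, if_pos (by omega)]
        have h4 : min d0 (t.foldl min d) = t.foldl min d := by omega
        rw [h4]
      · rw [if_neg hv, if_neg (by omega)]

-- pack B's (distance, index) state into A's (name, distance) state via the full names list
def pvPack (names0 : List String) : Option (Int × Int) → Option String × Option Int
  | none => (none, none)
  | some c => (PySem.List.pyGet? names0 c.2, some c.1)

lemma pvPack_some (names0 : List String) (c : Int × Int) :
    pvPack names0 (some c) = (PySem.List.pyGet? names0 c.2, some c.1) := rfl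

-- main invariant: A's fold over a suffix = packed B-fold over that suffix's candidates
lemma pvMain (page : Int) (sp : List (String × List Int)) (names0 : List String) :
    ∀ (rest : List String) (s : Nat), names0.drop s = rest →
    ∀ (m : Option (Int × Int)), (∀ c, m = some c → 0 ≤ c.2 ∧ c.2 < (s : Int)) →
    rest.foldl
      (fun (st : Option String × Option Int) name =>
        match (PySem.Dict.mk sp).getD name [] with
        | [] => st
        | p :: ps =>
          match PySem.List.min? ((p :: ps).map (fun q => |page - q|)) (fun x => x) with
          | none => st
          | some distance =>
            match st.2 with
            | none => (some name, some distance)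
            | some bd => if distance < bd then (some name, some distance) else st)
      (pvPack names0 m)
    = pvPack names0
        (((PySem.List.enumerate rest (s : Int)).flatMap
            (fun iname => ((PySem.Dict.mk sp).getD iname.2 []).map (fun p => (|page - p|, iname.1)))).foldl
          pvLStep m) := by
  intro rest
  induction rest with
  | nil => intro s _ m _; rfl
  | cons name t ih =>
    intro s hdrop m hm
    have hdrop' : names0.drop (s + 1) = t := by
      have h1 : names0.drop (s + 1) = (names0.drop s).drop 1 := by rw [List.drop_drop]
      rw [h1, hdrop]; rfl
    have hget : PySem.List.pyGet? names0 ((s : Nat) : Int) = some name := by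
      rw [PySem.List.pyGet?_natCast]
      have h0 : names0[s]? = (names0.drop s)[0]? := by simp [List.getElem?_drop]
      rw [h0, hdrop]; rfl
    rw [PySem.List.enumerate_cons]
    simp only [List.foldl_cons, List.flatMap_cons, List.foldl_append]
    rcases hpg : (PySem.Dict.mk sp).getD name [] with _ | ⟨p, ps⟩
    · simp only [List.map_nil, List.foldl_nil]
      have hrec := ih (s + 1) hdrop' m (by intro c hc; have := hm c hc; push_cast; omega)
      push_cast at hrec ⊢
      exact hrec
    · simp only [List.map_cons, PySem.List.min?_id_cons, List.foldl_map]
      cases m with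
      | none =>
        simp only [pvPack, List.foldl_cons, pvLStep_none]
        have hmin : (ps.map (fun q => |page - q|)).foldl min (|page - p|)
            = ps.foldl (fun x y => min x |page - y|) (|page - p|) := by rw [List.foldl_map]
        have hB := pvLexA ((s : Nat) : Int) (ps.map (fun q => |page - q|)) (|page - p|)
        rw [List.map_map] at hB
        simp only [Function.comp_def] at hB
        rw [hmin] at hB
        rw [hB]
        have hrec := ih (s + 1) hdrop'
          (some ((ps.foldl (fun x y => min x |page - y|) (|page - p|)), ((s : Nat) : Int)))
          (by intro c hc; cases hc; constructor <;> push_cast <;> omega)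
        have hp : pvPack names0 (some ((ps.foldl (fun x y => min x |page - y|) (|page - p|)), ((s : Nat) : Int)))
            = (some name, some (ps.foldl (fun x y => min x |page - y|) (|page - p|))) := by
          rw [pvPack_some, hget]
        rw [hp] at hrec
        simp only [List.map_cons, PySem.List.min?_id_cons, List.foldl_map, pvPack] at hrec
        push_cast at hrec ⊢
        exact hrec
      | some b =>
        obtain ⟨bd, bi⟩ := b
        obtain ⟨hb0, hbs⟩ := hm (bd, bi) rfl
        simp only [pvPack, List.foldl_cons]
        have hmin : (ps.map (fun q => |page - q|)).foldl min (|page - p|)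
            = ps.foldl (fun x y => min x |page - y|) (|page - p|) := by rw [List.foldl_map]
        have hB := pvLexB ((s : Nat) : Int) bi bd hbs (ps.map (fun q => |page - q|)) (|page - p|)
        simp only [List.map_cons, List.map_map, Function.comp_def, List.foldl_cons] at hB
        rw [hmin] at hB
        rw [hB]
        by_cases hv : ps.foldl (fun x y => min x |page - y|) (|page - p|) < bd
        · rw [if_pos hv, if_pos hv]
          have hrec := ih (s + 1) hdrop'
            (some ((ps.foldl (fun x y => min x |page - y|) (|page - p|)), ((s : Nat) : Int)))
            (by intro c hc; cases hc; constructor <;> push_cast <;> omega)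
          have hp : pvPack names0 (some ((ps.foldl (fun x y => min x |page - y|) (|page - p|)), ((s : Nat) : Int)))
              = (some name, some (ps.foldl (fun x y => min x |page - y|) (|page - p|))) := by
            rw [pvPack_some, hget]
          rw [hp] at hrec
          simp only [List.map_cons, PySem.List.min?_id_cons, List.foldl_map, pvPack] at hrec
          push_cast at hrec ⊢
          exact hrec
        · rw [if_neg hv, if_neg hv]
          have hrec := ih (s + 1) hdrop' (some (bd, bi))
            (by intro c hc; cases hc; constructor <;> push_cast <;> omega)
          simp only [List.map_cons, PySem.List.min?_id_cons, List.foldl_map, pvPack] at hrec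
          push_cast at hrec ⊢
          exact hrec

lemma pvFoldSome (l : List (Int × Int)) (c : Int × Int) :
    ∃ d, l.foldl pvLStep (some c) = some d := by
  induction l generalizing c with
  | nil => exact ⟨c, rfl⟩
  | cons x t ih =>
    simp only [List.foldl_cons, pvLStep_some]
    split <;> exact ih _

-- ===== VERDICT (by name: the statement is the Claim_ definition above) =====
theorem nearest_section_by_page_py_spec : Claim_equal_nearest_section_by_page_py := by
  intro page sp names _
  unfold Spec_nearest_section_by_page_py nearest_section_by_page_py nearest_section_by_page_py_alt
  have hmain := pvMain page sp names names 0 rfl none (by intro c hc; cases hc)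
  simp only [Nat.cast_zero] at hmain
  set C := (PySem.List.enumerate names (0 : Int)).flatMap
      (fun iname => ((PySem.Dict.mk sp).getD iname.2 []).map (fun p => (|page - p|, iname.1))) with hC
  simp only [pvPack] at hmain
  rw [hmain]
  simp only [pvMin2Eq]
  rcases hCc : C with _ | ⟨c, cs⟩
  · rfl
  · simp only [List.isEmpty_cons, Bool.false_eq_true, if_false, List.foldl_cons, pvLStep_none]
    obtain ⟨d, hd⟩ := pvFoldSome cs c
    rw [hd]
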